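-- pv_equiv track=rewrite | github.com/Harvey212/ComputationalGeometry | PotentialFieldProject/exp/play3.py | world_2_canvas
-- ===== SOURCE A (Python) =====
-- def world_2_canvas(world):
--
-- 	world=list(world)
-- 	can=[]
-- 	tr=0
-- 	count=0
-- 	for num in world:
-- 		check=count%2
-- 		if check==0:
-- 			tr=num+halfwindow
-- 		else:
-- 			tr=halfwindow-num
--
-- 		can.append(tr)
-- 		count=count+1
--
-- 	return can
--
-- halfwindow=200
-- ===== SOURCE B (Python) =====
-- halfwindow = 200
--
-- def world_2_canvas(world):
--     w = list(world)
--     out = []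
--     n = len(w)
--     i = 0
--     while i + 1 < n:
--         out.append(w[i] + halfwindow)
--         out.append(halfwindow - w[i + 1])
--         i += 2
--     if i < n:
--         out.append(w[i] + halfwindow)
--     return out
-- ===== Notes on version B (the rewrite author's own statement) =====
-- stated objective: alternative
-- what changed: Replaces the single-element loop with a running counter and parity test by a pairwise consumer that takes two elements per step (x+halfwindow then halfwindow-y), with a final lone even element handled after the loop; no counter or modulo remains.
import Mathlib
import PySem

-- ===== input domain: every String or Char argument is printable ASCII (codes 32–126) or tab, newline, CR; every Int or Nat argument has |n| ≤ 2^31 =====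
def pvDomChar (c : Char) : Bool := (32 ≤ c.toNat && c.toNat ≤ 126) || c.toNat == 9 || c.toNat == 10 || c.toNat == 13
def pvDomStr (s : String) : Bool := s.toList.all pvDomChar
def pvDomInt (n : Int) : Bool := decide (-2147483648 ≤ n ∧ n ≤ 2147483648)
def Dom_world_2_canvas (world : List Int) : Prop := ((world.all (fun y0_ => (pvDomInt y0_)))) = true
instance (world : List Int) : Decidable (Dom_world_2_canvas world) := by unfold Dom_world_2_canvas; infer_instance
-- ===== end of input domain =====

-- B replaces A's counter-and-parity loop by a pairwise two-elements-per-step consumer (alternative decomposition, same cost).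

def halfwindowA : Int := 200

-- ===== PORT A =====
-- state: (can, tr, count); one step per element, branching on count % 2
def world_2_canvas (world : List Int) : List Int :=
  (world.foldl
    (fun (s : List Int × Int × Int) num =>
      let check := PySem.Int.mod s.2.2 2
      let tr := if check = 0 then num + halfwindowA else halfwindowA - num
      (s.1 ++ [tr], tr, s.2.2 + 1))
    ([], 0, 0)).1

-- ===== PORT B =====
-- two elements per step; a lone trailing element is an even-index one
def world_2_canvas_alt (world : List Int) : List Int :=
  match world with
  | [] => []
  | [x] => [x + halfwindowA]
  | x :: y :: rest => (x + halfwindowA) :: (halfwindowA - y) :: world_2_canvas_alt rest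

-- ===== PRECONDITION & SPEC =====
def Spec_world_2_canvas (world : List Int) (out : List Int) : Prop := out = world_2_canvas_alt world
instance (world : List Int) (out : List Int) : Decidable (Spec_world_2_canvas world out) := by unfold Spec_world_2_canvas; infer_instance

-- ===== CLAIM (what is proved, stated in full; the proofs are below) =====
def Claim_equal_world_2_canvas : Prop := ∀ (world : List Int), Dom_world_2_canvas world → Spec_world_2_canvas world (world_2_canvas world)

-- ===== LEMMAS AND PROOFS =====

lemma mod_two_even (k : Int) : PySem.Int.mod (2*k) 2 = 0 := by
  rw [PySem.Int.mod_eq_emod_of_pos (by norm_num : (0:Int) < 2)]; omega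

lemma mod_two_odd (k : Int) : PySem.Int.mod (2*k + 1) 2 = 1 := by
  rw [PySem.Int.mod_eq_emod_of_pos (by norm_num : (0:Int) < 2)]; omega

lemma foldlA_go (w : List Int) : ∀ (acc : List Int) (tr k : Int),
    (w.foldl
      (fun (s : List Int × Int × Int) num =>
        let check := PySem.Int.mod s.2.2 2
        let tr := if check = 0 then num + halfwindowA else halfwindowA - num
        (s.1 ++ [tr], tr, s.2.2 + 1))
      (acc, tr, 2*k)).1 = acc ++ world_2_canvas_alt w := by
  induction w using world_2_canvas_alt.induct with
  | case1 => simp [world_2_canvas_alt]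
  | case2 x =>
      intro acc tr k
      simp [List.foldl, world_2_canvas_alt]
  | case3 x y rest ih =>
      intro acc tr k
      have h1 : (2*k : Int) + 1 + 1 = 2*(k+1) := by ring
      have hrec := ih (acc ++ [x + halfwindowA] ++ [halfwindowA - y]) (halfwindowA - y) (k+1)
      simp only [List.foldl, mod_two_even, mod_two_odd, h1, world_2_canvas_alt] at hrec ⊢
      simp only [show ((1:Int) = 0) = False by simp, if_false, if_true] at hrec ⊢
      simpa using hrec

-- ===== VERDICT (by name: the statement is the Claim_ definition above) =====
theorem world_2_canvas_spec : Claim_equal_world_2_canvas := by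
  intro w _
  unfold Spec_world_2_canvas world_2_canvas
  have := foldlA_go w [] 0 0
  simpa using this
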